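-- pv_equiv track=rewrite | github.com/Jasonwts-x/BIS5151E_Research-Assistant | src/eval/guardrails.py | _is_jailbreak_attempt
-- ===== SOURCE A (Python) =====
-- def _is_jailbreak_attempt(text: str) -> bool:
--     """Detect jailbreak attempts."""
--     jailbreak_patterns = [
--         "ignore previous instructions",
--         "ignore all previous",
--         "disregard your programming",
--         "you are now in developer mode",
--         "forget your constraints",
--         "act as if",
--         "pretend you are",
--         "reveal your system prompt",
--         "bypass your restrictions"
--     ]
--     text_lower = text.lower()
--     return any(pattern in text_lower for pattern in jailbreak_patterns)
-- ===== SOURCE B (Python) =====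
-- _PATTERNS = (
--     "ignore previous instructions",
--     "ignore all previous",
--     "disregard your programming",
--     "you are now in developer mode",
--     "forget your constraints",
--     "act as if",
--     "pretend you are",
--     "reveal your system prompt",
--     "bypass your restrictions",
-- )
--
--
-- def _is_jailbreak_attempt(text: str) -> bool:
--     """Detect jailbreak attempts with a single left-to-right scan."""
--     low = text.lower()
--     for i in range(len(low)):
--         if low.startswith(_PATTERNS, i):
--             return True
--     return False
-- ===== Notes on version B (the rewrite author's own statement) =====
-- stated objective: alternative
-- what changed: Replaces the nine independent substring-containment scans with one left-to-right pass over the lowered text that checks at each position whether any pattern starts there (str.startswith with a tuple of patterns).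
import Mathlib
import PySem

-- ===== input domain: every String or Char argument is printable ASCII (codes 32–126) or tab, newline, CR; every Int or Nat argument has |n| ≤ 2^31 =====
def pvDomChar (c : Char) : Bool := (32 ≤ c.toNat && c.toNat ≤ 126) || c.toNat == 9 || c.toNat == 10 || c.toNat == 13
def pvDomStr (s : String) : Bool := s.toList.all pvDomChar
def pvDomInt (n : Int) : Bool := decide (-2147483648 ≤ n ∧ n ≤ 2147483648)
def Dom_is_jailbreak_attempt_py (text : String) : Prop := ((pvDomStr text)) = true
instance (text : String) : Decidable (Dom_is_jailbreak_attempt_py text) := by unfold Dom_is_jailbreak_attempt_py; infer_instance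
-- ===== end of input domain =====

-- B replaces A's nine independent substring scans by one left-to-right pass that tests each
-- position for a pattern prefix (objective: alternative single-pass structure; same results).

-- ===== PORT A =====
-- A's pattern list, in A's order
def pvJbPatternsA : List String := [
  "ignore previous instructions",
  "ignore all previous",
  "disregard your programming",
  "you are now in developer mode",
  "forget your constraints",
  "act as if",
  "pretend you are",
  "reveal your system prompt",
  "bypass your restrictions"]

-- any(pattern in text_lower for pattern in jailbreak_patterns)
def is_jailbreak_attempt_py (text : String) : Bool :=
  let text_lower := PySem.Chars.lower text.toList
  pvJbPatternsA.any (fun pattern => PySem.Chars.isIn pattern.toList text_lower)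

-- ===== PORT B =====
-- B's pattern tuple
def pvJbPatternsB : List String := [
  "ignore previous instructions",
  "ignore all previous",
  "disregard your programming",
  "you are now in developer mode",
  "forget your constraints",
  "act as if",
  "pretend you are",
  "reveal your system prompt",
  "bypass your restrictions"]

-- the loop 'for i in range(len(low)): if low.startswith(_PATTERNS, i): return True',
-- as structural recursion over the suffixes of low (suffix starting at i = c :: rest)
def pvJbScan (pats : List (List Char)) : List Char → Bool
  | [] => false
  | c :: rest =>
      if pats.any (fun p => PySem.Chars.startswith (c :: rest) p) then true
      else pvJbScan pats rest

def is_jailbreak_attempt_py_alt (text : String) : Bool :=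
  pvJbScan (pvJbPatternsB.map (·.toList)) (PySem.Chars.lower text.toList)

-- ===== PRECONDITION & SPEC =====
def Spec_is_jailbreak_attempt_py (text : String) (out : Bool) : Prop := out = is_jailbreak_attempt_py_alt text
instance (text : String) (out : Bool) : Decidable (Spec_is_jailbreak_attempt_py text out) := by unfold Spec_is_jailbreak_attempt_py; infer_instance

-- ===== CLAIM (what is proved, stated in full; the proofs are below) =====
def Claim_equal_is_jailbreak_attempt_py : Prop := ∀ (text : String), Dom_is_jailbreak_attempt_py text → Spec_is_jailbreak_attempt_py text (is_jailbreak_attempt_py text)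

-- ===== LEMMAS AND PROOFS =====

-- Python's 'p in (c :: rest)' splits into 'match at position 0' or 'p in rest'
lemma pvIsIn_cons (p : List Char) (c : Char) (rest : List Char) :
    PySem.Chars.isIn p (c :: rest)
      = (PySem.Chars.startswith (c :: rest) p || PySem.Chars.isIn p rest) := by
  rw [Bool.eq_iff_iff]
  simp [PySem.Chars.isIn_iff_infix, PySem.Chars.startswith_iff, List.infix_cons_iff]

lemma pvIsIn_nil (p : List Char) (h : p ≠ []) : PySem.Chars.isIn p [] = false := by
  apply Bool.eq_false_iff.mpr
  intro hc
  rw [PySem.Chars.isIn_iff_infix] at hc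
  simp at hc
  exact h hc

-- the single-pass scan decides exactly 'some pattern occurs somewhere' (patterns nonempty)
lemma pvJbScan_eq_any_isIn (pats : List (List Char)) (hne : ∀ p ∈ pats, p ≠ []) :
    ∀ l : List Char, pvJbScan pats l = pats.any (fun p => PySem.Chars.isIn p l) := by
  intro l
  induction l with
  | nil =>
      simp only [pvJbScan]
      symm
      rw [List.any_eq_false]
      intro p hp
      simp [pvIsIn_nil p (hne p hp)]
  | cons c rest ih =>
      by_cases h : pats.any (fun p => PySem.Chars.startswith (c :: rest) p) = true
      · simp only [pvJbScan, h, if_true]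
        symm
        rw [List.any_eq_true] at h ⊢
        obtain ⟨p, hp, hs⟩ := h
        exact ⟨p, hp, by simp [pvIsIn_cons, hs]⟩
      · simp only [pvJbScan, h, if_false, Bool.false_eq_true, ih]
        rw [Bool.eq_iff_iff]
        simp only [List.any_eq_true, pvIsIn_cons, Bool.or_eq_true] at h ⊢
        constructor
        · rintro ⟨p, hp, hr⟩
          exact ⟨p, hp, Or.inr hr⟩
        · rintro ⟨p, hp, hs | hr⟩
          · exact absurd ⟨p, hp, hs⟩ h
          · exact ⟨p, hp, hr⟩

-- ===== VERDICT (by name: the statement is the Claim_ definition above) =====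
theorem is_jailbreak_attempt_py_spec : Claim_equal_is_jailbreak_attempt_py := by
  intro text _
  unfold Spec_is_jailbreak_attempt_py is_jailbreak_attempt_py is_jailbreak_attempt_py_alt
  rw [pvJbScan_eq_any_isIn (pvJbPatternsB.map (·.toList)) (by decide)]
  rw [List.any_map]
  rfl
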